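-- pv_equiv track=rewrite | github.com/MoonLadderStudios/MoonMind | moonmind/workflows/skills/plan_validation.py | _json_pointer_tokens
-- ===== SOURCE A (Python) =====
-- class PlanValidationError(ValueError):
--     """Raised when a plan violates structural or schema contracts."""
--
--     def __init__(self, code: str, message: str) -> None:
--         super().__init__(message)
--         self.code = code
--
-- def _json_pointer_tokens(pointer: str) -> list[str]:
--     if pointer == "":
--         return []
--     if not pointer.startswith("/"):
--         raise PlanValidationError(
--             "invalid_reference",
--             f"json_pointer must start with '/': {pointer}",
--         )
--     tokens = pointer.split("/")[1:]
--     return [token.replace("~1", "/").replace("~0", "~") for token in tokens]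
-- ===== SOURCE B (Python) =====
-- class PlanValidationError(ValueError):
--     """Raised when a plan violates structural or schema contracts."""
--
--     def __init__(self, code: str, message: str) -> None:
--         super().__init__(message)
--         self.code = code
--
--
-- def _json_pointer_tokens(pointer: str) -> list[str]:
--     if pointer == "":
--         return []
--     if not pointer.startswith("/"):
--         raise PlanValidationError(
--             "invalid_reference",
--             f"json_pointer must start with '/': {pointer}",
--         )
--     # single left-to-right scan: split on '/' and decode ~0/~1 in one pass
--     tokens: list[str] = []
--     cur: list[str] = []
--     i = 1
--     n = len(pointer)
--     while i < n:
--         c = pointer[i]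
--         if c == "/":
--             tokens.append("".join(cur))
--             cur = []
--             i += 1
--         elif c == "~" and i + 1 < n and pointer[i + 1] == "0":
--             cur.append("~")
--             i += 2
--         elif c == "~" and i + 1 < n and pointer[i + 1] == "1":
--             cur.append("/")
--             i += 2
--         else:
--             cur.append(c)
--             i += 1
--     tokens.append("".join(cur))
--     return tokens
-- ===== Notes on version B (the rewrite author's own statement) =====
-- stated objective: alternative
-- what changed: A splits the pointer on slashes and then runs two chained str.replace passes over every token; B makes a single left-to-right index scan over the pointer that splits on slashes and decodes the tilde escape sequences in the same pass.
import Mathlib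
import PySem

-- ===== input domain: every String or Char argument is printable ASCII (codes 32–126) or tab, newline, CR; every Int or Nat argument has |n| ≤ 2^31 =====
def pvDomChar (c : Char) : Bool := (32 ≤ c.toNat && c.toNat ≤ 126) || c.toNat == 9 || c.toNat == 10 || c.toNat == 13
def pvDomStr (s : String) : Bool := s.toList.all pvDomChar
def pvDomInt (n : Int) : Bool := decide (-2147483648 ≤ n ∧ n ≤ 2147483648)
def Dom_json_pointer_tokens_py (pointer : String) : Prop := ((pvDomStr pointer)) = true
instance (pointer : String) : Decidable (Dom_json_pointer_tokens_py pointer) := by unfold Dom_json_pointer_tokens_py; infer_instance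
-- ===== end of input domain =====

-- B replaces A's split + two chained .replace passes by one left-to-right scan that
-- splits on slashes and decodes the tilde escapes in a single pass (objective: alternative algorithm).

-- ===== PORT A =====
def json_pointer_tokens_py (pointer : String) : List String :=
  if pointer = "" then []
  else if PySem.Str.startswith pointer "/" = false then []   -- Python raises PlanValidationError here (excluded by Pre_)
  else
    let tokens := ((PySem.Chars.splitOn pointer.toList ['/']).map String.ofList).drop 1
    tokens.map (fun token => PySem.Str.replace (PySem.Str.replace token "~1" "/") "~0" "~")

-- ===== PORT B =====
-- B's while-loop over index i with cur/tokens accumulators, as structural recursion over the chars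
def pvScanB : List Char → List Char → List String → List String
  | [], cur, acc => acc ++ [String.ofList cur]
  | c :: rest, cur, acc =>
    if c = '/' then pvScanB rest [] (acc ++ [String.ofList cur])
    else if c = '~' ∧ rest.head? = some '0' then pvScanB rest.tail (cur ++ ['~']) acc
    else if c = '~' ∧ rest.head? = some '1' then pvScanB rest.tail (cur ++ ['/']) acc
    else pvScanB rest (cur ++ [c]) acc
termination_by l _ _ => l.length
decreasing_by all_goals simp [List.length_tail]; try omega

def json_pointer_tokens_py_alt (pointer : String) : List String :=
  if pointer = "" then []
  else if PySem.Str.startswith pointer "/" = false then []   -- B raises PlanValidationError here (excluded by Pre_)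
  else pvScanB pointer.toList.tail [] []

-- ===== PRECONDITION & SPEC =====
-- Pre_ excludes exactly the inputs where the Python (both A and B) raises PlanValidationError:
-- a nonempty pointer that does not start with a slash.
def Pre_json_pointer_tokens_py (pointer : String) : Prop :=
  pointer = "" ∨ PySem.Str.startswith pointer "/" = true
instance (pointer : String) : Decidable (Pre_json_pointer_tokens_py pointer) := by
  unfold Pre_json_pointer_tokens_py; infer_instance

def pvWitness_json_pointer_tokens_py : String := "/a~1b/c~0/"

def Spec_json_pointer_tokens_py (pointer : String) (out : List String) : Prop :=
  out = json_pointer_tokens_py_alt pointer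
instance (pointer : String) (out : List String) : Decidable (Spec_json_pointer_tokens_py pointer out) := by
  unfold Spec_json_pointer_tokens_py; infer_instance

-- ===== CLAIM (what is proved, stated in full; the proofs are below) =====
def Claim_equal_json_pointer_tokens_py : Prop :=
  ∀ (pointer : String), Dom_json_pointer_tokens_py pointer →
    Pre_json_pointer_tokens_py pointer →
    Spec_json_pointer_tokens_py pointer (json_pointer_tokens_py pointer)

-- ===== LEMMAS AND PROOFS =====

-- reference split on the slash character: (current head token, remaining tokens)
def splitS : List Char → List Char × List (List Char)
  | [] => ([], [])
  | c :: t =>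
    let p := splitS t
    if c = '/' then ([], p.1 :: p.2) else (c :: p.1, p.2)

-- reference single replace of a two-char tilde pattern by one char
def repTx (x y : Char) : List Char → List Char
  | [] => []
  | c :: t =>
    if c = '~' ∧ t.head? = some x then y :: repTx x y t.tail else c :: repTx x y t
termination_by l => l.length
decreasing_by all_goals simp [List.length_tail]; try omega

-- reference one-pass unescape
def unesc : List Char → List Char
  | [] => []
  | c :: t =>
    if c = '~' ∧ t.head? = some '0' then '~' :: unesc t.tail
    else if c = '~' ∧ t.head? = some '1' then '/' :: unesc t.tail
    else c :: unesc t
termination_by l => l.length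
decreasing_by all_goals simp [List.length_tail]; try omega

lemma splitOn_go_eq (l : List Char) : ∀ (cur : List Char) (acc : List (List Char)),
    PySem.Chars.splitOn.go ['/'] (l.length + 1) l cur acc
      = acc.reverse ++ (cur.reverse ++ (splitS l).1) :: (splitS l).2 := by
  induction l with
  | nil => intro cur acc; simp [PySem.Chars.splitOn.go, splitS]
  | cons c t ih =>
    intro cur acc
    rw [PySem.Chars.splitOn.go]
    by_cases hc : c = '/'
    · subst hc
      simp only [List.isPrefixOf, beq_self_eq_true, Bool.and_self, if_true, List.length_cons,
        List.length_nil, Nat.zero_add, List.drop_succ_cons, List.drop_zero]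
      rw [ih]
      simp [splitS]
    · have hpre : List.isPrefixOf ['/'] (c :: t) = false := by
        simp [List.isPrefixOf]; exact fun h => (hc h.symm).elim
      simp only [List.length_cons, hpre, Bool.false_eq_true, if_false]
      rw [ih]
      simp [splitS, hc]

lemma splitOn_eq (s : List Char) :
    PySem.Chars.splitOn s ['/'] = ((splitS s).1 :: (splitS s).2) := by
  unfold PySem.Chars.splitOn
  simpa using splitOn_go_eq s [] []

lemma replace_go_eq (x y : Char) : ∀ (fuel : Nat) (l : List Char), l.length ≤ fuel →
    ∀ (acc : List Char),
    PySem.Chars.replace.go ['~', x] [y] fuel l acc = acc.reverse ++ repTx x y l := by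
  intro fuel
  induction fuel with
  | zero =>
    intro l hl acc
    have : l = [] := by cases l <;> simp_all
    subst this
    simp [PySem.Chars.replace.go, repTx]
  | succ f ih =>
    intro l hl acc
    cases l with
    | nil => simp [PySem.Chars.replace.go, repTx]
    | cons c t =>
      rw [PySem.Chars.replace.go]
      by_cases hp : c = '~' ∧ t.head? = some x
      · obtain ⟨hc, ht⟩ := hp
        obtain ⟨t', ht'⟩ : ∃ t', t = x :: t' := by
          cases t with
          | nil => simp at ht
          | cons a b => simp at ht; exact ⟨b, by simp [ht]⟩
        subst hc ht'
        have hpre : List.isPrefixOf ['~', x] ('~' :: x :: t') = true := by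
          simp [List.isPrefixOf]
        simp only [hpre, if_true, List.length_cons, List.length_nil, List.drop_succ_cons,
          List.drop_zero, List.reverse_cons, List.reverse_nil, List.nil_append,
          List.singleton_append]
        rw [ih t' (by simp at hl ⊢; omega)]
        rw [repTx]
        simp
      · have hpre : List.isPrefixOf ['~', x] (c :: t) = false := by
          cases t with
          | nil => simp [List.isPrefixOf]
          | cons a b =>
            simp [List.isPrefixOf]
            intro hc ha
            exact absurd ⟨hc.symm, by simp [ha]⟩ hp
        simp only [hpre, Bool.false_eq_true, if_false]
        rw [ih t (by simp at hl ⊢; omega)]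
        rw [repTx]
        simp [hp]

lemma replace_eq (x y : Char) (l : List Char) :
    PySem.Chars.replace l ['~', x] [y] = repTx x y l := by
  unfold PySem.Chars.replace
  simp only [List.isEmpty_cons, Bool.false_eq_true, if_false]
  simpa using replace_go_eq x y l.length l (le_refl _) []

lemma repTx_nil (x y : Char) : repTx x y [] = [] := by simp [repTx]

lemma unesc_nil : unesc [] = [] := by simp [unesc]

-- the two chained replaces equal the one-pass unescape
lemma rep_eq_unesc : ∀ (n : Nat) (t : List Char), t.length ≤ n →
    repTx '0' '~' (repTx '1' '/' t) = unesc t := by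
  intro n
  induction n with
  | zero =>
    intro t ht
    have : t = [] := by cases t <;> simp_all
    subst this; simp [repTx_nil, unesc_nil]
  | succ f ih =>
    intro t ht
    match t with
    | [] => simp [repTx_nil, unesc_nil]
    | [c] => simp [repTx, unesc]
    | c :: d :: t'' =>
      by_cases hc : c = '~'
      · subst hc
        by_cases h1 : d = '1'
        · subst h1
          rw [show repTx '1' '/' ('~' :: '1' :: t'') = '/' :: repTx '1' '/' t'' by
            rw [repTx]; simp]
          rw [show repTx '0' '~' ('/' :: repTx '1' '/' t'')
              = '/' :: repTx '0' '~' (repTx '1' '/' t'') by rw [repTx]; simp]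
          rw [ih t'' (by simp at ht ⊢; omega)]
          rw [show unesc ('~' :: '1' :: t'') = '/' :: unesc t'' by rw [unesc]; simp]
        · by_cases h0 : d = '0'
          · subst h0
            rw [show repTx '1' '/' ('~' :: '0' :: t'') = '~' :: repTx '1' '/' ('0' :: t'') by
              rw [repTx]; simp]
            rw [show repTx '1' '/' ('0' :: t'') = '0' :: repTx '1' '/' t'' by
              rw [repTx]; simp]
            rw [show repTx '0' '~' ('~' :: '0' :: repTx '1' '/' t'')
                = '~' :: repTx '0' '~' (repTx '1' '/' t'') by rw [repTx]; simp]
            rw [ih t'' (by simp at ht ⊢; omega)]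
            rw [show unesc ('~' :: '0' :: t'') = '~' :: unesc t'' by rw [unesc]; simp]
          · have hhead : (repTx '1' '/' (d :: t'')).head? ≠ some '0' := by
              rw [repTx]; split_ifs <;> simp [h0]
            rw [show repTx '1' '/' ('~' :: d :: t'') = '~' :: repTx '1' '/' (d :: t'') by
              rw [repTx]; simp [h1]]
            rw [show repTx '0' '~' ('~' :: repTx '1' '/' (d :: t''))
                = '~' :: repTx '0' '~' (repTx '1' '/' (d :: t'')) by
              rw [repTx]; simp only [List.tail_cons]
              rw [if_neg (by intro h; exact hhead h.2)]]
            rw [ih (d :: t'') (by simp at ht ⊢; omega)]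
            rw [show unesc ('~' :: d :: t'') = '~' :: unesc (d :: t'') by
              rw [unesc]; simp [h0, h1]]
      · rw [show repTx '1' '/' (c :: d :: t'') = c :: repTx '1' '/' (d :: t'') by
          rw [repTx]; simp [hc]]
        rw [show repTx '0' '~' (c :: repTx '1' '/' (d :: t''))
            = c :: repTx '0' '~' (repTx '1' '/' (d :: t'')) by rw [repTx]; simp [hc]]
        rw [ih (d :: t'') (by simp at ht ⊢; omega)]
        rw [show unesc (c :: d :: t'') = c :: unesc (d :: t'') by rw [unesc]; simp [hc]]

lemma splitS_fst_head? (t : List Char) :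
    (splitS t).1.head? = if t.head? = some '/' then none else t.head? := by
  cases t with
  | nil => simp [splitS]
  | cons c t' =>
    by_cases hc : c = '/'
    · subst hc; simp [splitS]
    · simp [splitS, hc]

lemma pvScanB_eq : ∀ (n : Nat) (l : List Char), l.length ≤ n →
    ∀ (cur : List Char) (acc : List String),
    pvScanB l cur acc
      = acc ++ String.ofList (cur ++ unesc (splitS l).1)
          :: (splitS l).2.map (fun t => String.ofList (unesc t)) := by
  intro n
  induction n with
  | zero =>
    intro l hl cur acc
    have : l = [] := by cases l <;> simp_all
    subst this; simp [pvScanB, splitS, unesc_nil]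
  | succ f ih =>
    intro l hl cur acc
    cases l with
    | nil => simp [pvScanB, splitS, unesc_nil]
    | cons c t =>
      by_cases hc : c = '/'
      · subst hc
        rw [show pvScanB ('/' :: t) cur acc = pvScanB t [] (acc ++ [String.ofList cur]) by
          rw [pvScanB]; simp]
        rw [ih t (by simp at hl ⊢; omega)]
        rw [show splitS ('/' :: t) = ([], (splitS t).1 :: (splitS t).2) by simp [splitS]]
        simp [unesc_nil]
      · by_cases h0 : c = '~' ∧ t.head? = some '0'
        · obtain ⟨hc', ht⟩ := h0
          obtain ⟨t', rfl⟩ : ∃ t', t = '0' :: t' := by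
            cases t with
            | nil => simp at ht
            | cons a b => simp at ht; exact ⟨b, by simp [ht]⟩
          subst hc'
          rw [show pvScanB ('~' :: '0' :: t') cur acc = pvScanB t' (cur ++ ['~']) acc by
            rw [pvScanB]; simp]
          rw [ih t' (by simp at hl ⊢; omega)]
          rw [show splitS ('~' :: '0' :: t') = ('~' :: '0' :: (splitS t').1, (splitS t').2) by
            simp [splitS]]
          rw [show unesc ('~' :: '0' :: (splitS t').1) = '~' :: unesc (splitS t').1 by
            rw [unesc]; simp]
          simp
        · by_cases h1 : c = '~' ∧ t.head? = some '1'
          · obtain ⟨hc', ht⟩ := h1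
            obtain ⟨t', rfl⟩ : ∃ t', t = '1' :: t' := by
              cases t with
              | nil => simp at ht
              | cons a b => simp at ht; exact ⟨b, by simp [ht]⟩
            subst hc'
            rw [show pvScanB ('~' :: '1' :: t') cur acc = pvScanB t' (cur ++ ['/']) acc by
              rw [pvScanB]; simp]
            rw [ih t' (by simp at hl ⊢; omega)]
            rw [show splitS ('~' :: '1' :: t') = ('~' :: '1' :: (splitS t').1, (splitS t').2) by
              simp [splitS]]
            rw [show unesc ('~' :: '1' :: (splitS t').1) = '/' :: unesc (splitS t').1 by
              rw [unesc]; simp]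
            simp
          · rw [show pvScanB (c :: t) cur acc = pvScanB t (cur ++ [c]) acc by
              rw [pvScanB]; rw [if_neg hc, if_neg h0, if_neg h1]]
            rw [ih t (by simp at hl ⊢; omega)]
            rw [show splitS (c :: t) = (c :: (splitS t).1, (splitS t).2) by simp [splitS, hc]]
            have hu : unesc (c :: (splitS t).1) = c :: unesc (splitS t).1 := by
              rw [unesc]
              rw [if_neg, if_neg]
              · intro ⟨hcc, hh⟩
                rw [splitS_fst_head?] at hh
                by_cases hsl : t.head? = some '/'
                · rw [if_pos hsl] at hh; exact absurd hh (by simp)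
                · rw [if_neg hsl] at hh; exact h1 ⟨hcc, hh⟩
              · intro ⟨hcc, hh⟩
                rw [splitS_fst_head?] at hh
                by_cases hsl : t.head? = some '/'
                · rw [if_pos hsl] at hh; exact absurd hh (by simp)
                · rw [if_neg hsl] at hh; exact h0 ⟨hcc, hh⟩
            rw [hu]
            simp

-- ===== VERDICT (by name: the statement is the Claim_ definition above) =====
theorem json_pointer_tokens_py_spec : Claim_equal_json_pointer_tokens_py := by
  intro pointer _ hpre
  unfold Spec_json_pointer_tokens_py json_pointer_tokens_py json_pointer_tokens_py_alt
  by_cases hempty : pointer = ""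
  · simp [hempty]
  · rcases hpre with h | hsw
    · exact absurd h hempty
    · rw [if_neg hempty, if_neg hempty, if_neg (by rw [hsw]; simp),
        if_neg (by rw [hsw]; simp)]
      obtain ⟨rest, hrest⟩ : ∃ rest, pointer.toList = '/' :: rest := by
        have heq : PySem.Chars.startswith pointer.toList "/".toList = true := by
          rw [← PySem.Str.startswith_eq]; exact hsw
        obtain ⟨s, hs⟩ := (PySem.Chars.startswith_iff pointer.toList "/".toList).mp heq
        exact ⟨s, by rw [← hs]; rfl⟩
      rw [hrest]
      rw [splitOn_eq]
      rw [show splitS ('/' :: rest) = ([], (splitS rest).1 :: (splitS rest).2) by simp [splitS]]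
      simp only [List.tail_cons, List.map_cons, List.drop_succ_cons, List.drop_zero]
      rw [pvScanB_eq rest.length rest (le_refl _) [] []]
      simp only [List.nil_append, List.map_cons]
      have hg : ∀ t : List Char,
          PySem.Str.replace (PySem.Str.replace (String.ofList t) "~1" "/") "~0" "~"
            = String.ofList (unesc t) := by
        intro t
        simp only [PySem.Str.replace]
        rw [show (String.ofList t).toList = t by simp]
        rw [show ("~1" : String).toList = ['~', '1'] from rfl,
            show ("/" : String).toList = ['/'] from rfl,
            show ("~0" : String).toList = ['~', '0'] from rfl,
            show ("~" : String).toList = ['~'] from rfl]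
        rw [show PySem.Chars.replace t ['~', '1'] ['/'] = repTx '1' '/' t from
          replace_eq '1' '/' t]
        rw [show (String.ofList (repTx '1' '/' t)).toList = repTx '1' '/' t by simp]
        rw [replace_eq '0' '~' (repTx '1' '/' t)]
        rw [rep_eq_unesc t.length t (le_refl _)]
      simp only [List.map_cons, List.map_map, Function.comp_def, hg, List.nil_append]
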